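-- pv_equiv track=rewrite | github.com/cstopics/tutorial-python | dictionary/count_duplicates.py | count_duplicates
-- ===== SOURCE A (Python) =====
-- def count_duplicates(d):
--     vals = set()
--     sum = 0
--     for (key, value) in d.items():
--         if (value in vals):
--             sum += 1
--         else:
--             vals.add(value)
--     return sum
-- ===== SOURCE B (Python) =====
-- def count_duplicates(d):
--     freq = {}
--     for value in d.values():
--         freq[value] = freq.get(value, 0) + 1
--     return sum(n - 1 for n in freq.values())
-- ===== Notes on version B (the rewrite author's own statement) =====
-- stated objective: alternative
-- what changed: Replaces the incremental seen-set with per-entry branch by a frequency table built over the values and a single aggregate sum of (count - 1).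
import Mathlib
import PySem

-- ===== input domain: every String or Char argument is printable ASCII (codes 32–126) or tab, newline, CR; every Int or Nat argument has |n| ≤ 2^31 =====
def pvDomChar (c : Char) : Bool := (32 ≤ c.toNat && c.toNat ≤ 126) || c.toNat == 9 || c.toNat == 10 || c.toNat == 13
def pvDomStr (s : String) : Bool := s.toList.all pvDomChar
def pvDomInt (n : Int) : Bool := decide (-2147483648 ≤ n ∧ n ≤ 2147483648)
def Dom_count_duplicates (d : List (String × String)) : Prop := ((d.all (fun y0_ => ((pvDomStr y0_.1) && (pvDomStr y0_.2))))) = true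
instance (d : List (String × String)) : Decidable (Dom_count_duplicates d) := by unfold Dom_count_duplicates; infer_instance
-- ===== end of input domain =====

-- B replaces A's incremental seen-set branch by a frequency table over the values and an aggregate sum of (count - 1); alternative decomposition, same cost.


-- ===== PORT A =====
-- vals = set(); sum = 0; for (key, value) in d.items(): if value in vals: sum += 1 else: vals.add(value); return sum
def count_duplicates (d : List (String × String)) : Int :=
  ((PySem.Dict.ofList d).items.foldl
    (fun (p : PySem.Set String × Int) kv =>
      if PySem.Set.contains p.1 kv.2 then (p.1, p.2 + 1) else (PySem.Set.add p.1 kv.2, p.2))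
    (PySem.Set.empty, 0)).2

-- ===== PORT B =====
-- freq = {}; for value in d.values(): freq[value] = freq.get(value, 0) + 1; return sum(n - 1 for n in freq.values())
def count_duplicates_alt (d : List (String × String)) : Int :=
  let freq := (PySem.Dict.ofList d).values.foldl
    (fun (f : PySem.Dict String Int) v => f.insert v (f.getD v 0 + 1)) PySem.Dict.empty
  (freq.values.map (fun n => n - 1)).sum

-- ===== PRECONDITION & SPEC =====
def Spec_count_duplicates (d : List (String × String)) (out : Int) : Prop := out = count_duplicates_alt d
instance (d : List (String × String)) (out : Int) : Decidable (Spec_count_duplicates d out) := by unfold Spec_count_duplicates; infer_instance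

-- ===== CLAIM (what is proved, stated in full; the proofs are below) =====
def Claim_equal_count_duplicates : Prop := ∀ (d : List (String × String)), Dom_count_duplicates d → Spec_count_duplicates d (count_duplicates d)

-- ===== LEMMAS AND PROOFS =====

-- A's loop: final counter = |vs| - (newly seen distinct values), tracked with the seen set.
theorem foldA_eq (vs : List String) : ∀ (s : PySem.Set String) (n : Int),
    vs.foldl
      (fun (p : PySem.Set String × Int) v =>
        if PySem.Set.contains p.1 v then (p.1, p.2 + 1) else (PySem.Set.add p.1 v, p.2))
      (s, n)
    = (PySem.Set.update s vs,
       n + vs.length + s.length - (PySem.Set.update s vs).length) := by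
  induction vs with
  | nil => intro s n; simp [PySem.Set.update]
  | cons v vs ih =>
    intro s n
    simp only [List.foldl_cons]
    by_cases h : v ∈ s
    · rw [if_pos ((PySem.Set.contains_iff s v).mpr h), ih, PySem.Set.update_cons,
          PySem.Set.add_of_mem h]
      simp only [Prod.mk.injEq, List.length_cons]
      exact ⟨trivial, by push_cast; ring⟩
    · rw [if_neg (fun hcc => h ((PySem.Set.contains_iff s v).mp hcc)), ih,
          PySem.Set.update_cons]
      have hlen : (PySem.Set.add s v).length = s.length + 1 := by
        rw [PySem.Set.add_of_not_mem h]; simp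
      simp only [Prod.mk.injEq, List.length_cons, hlen]
      exact ⟨trivial, by push_cast; ring⟩

-- sum of multiplicities of vs over a nodup list covering vs is |vs|
theorem sum_counts (vs : List String) : ∀ (S : List String), S.Nodup → (∀ x ∈ vs, x ∈ S) →
    (S.map (fun k => (vs.count k : Int))).sum = vs.length := by
  induction vs with
  | nil => intro S _ _; simp
  | cons v vs ih =>
    intro S hnd hcov
    have hv : v ∈ S := hcov v (by simp)
    have h1 : (S.map (fun k => ((v :: vs).count k : Int))).sum
        = (S.map (fun k => (vs.count k : Int) + (if v == k then 1 else 0))).sum := by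
      congr 1
      apply List.map_congr_left
      intro k _
      rw [List.count_cons]
      push_cast
      ring_nf
    have hcp : S.countP (fun k => v == k) = 1 := by
      have h2 : S.countP (fun k => v == k) = S.count v := by
        unfold List.count
        apply List.countP_congr
        intro x _
        by_cases h : v = x
        · simp [h]
        · simp [h, Ne.symm h]
      rw [h2]
      exact List.count_eq_one_of_mem hnd hv
    rw [h1, PySem.List.sum_map_add_int, ih S hnd (fun x hx => hcov x (by simp [hx])),
        PySem.List.sum_map_ite_one_zero (fun k => v == k) S, hcp]
    simp only [List.length_cons]
    push_cast; ring

-- B's aggregate = |vs| - |set(vs)|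
theorem foldB_eq (vs : List String) :
    (((vs.foldl (fun (f : PySem.Dict String Int) v => f.insert v (f.getD v 0 + 1))
        PySem.Dict.empty).values).map (fun n => n - 1)).sum
    = (vs.length : Int) - (PySem.Set.ofList vs).length := by
  rw [PySem.Dict.foldl_insert_getD_add_one_eq_counter]
  have hvals : (PySem.Dict.counter vs).values
      = (PySem.Set.ofList vs).map (fun k => (vs.count k : Int)) := by
    show ((PySem.Dict.counter vs).items).map (·.2) = _
    rw [PySem.Dict.items_counter]
    simp
  rw [hvals, List.map_map]
  have h1 : ((PySem.Set.ofList vs).map ((fun n => n - 1) ∘ fun k => (vs.count k : Int))).sum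
      = ((PySem.Set.ofList vs).map (fun k => (vs.count k : Int) + (-1))).sum := by
    refine congrArg List.sum (List.map_congr_left ?_)
    intro k _
    simp [sub_eq_add_neg]
  rw [h1, PySem.List.sum_map_add_int,
      sum_counts vs _ (PySem.Set.nodup_ofList vs) (fun x hx => (PySem.Set.mem_ofList vs x).mpr hx),
      PySem.List.sum_map_const_int]
  ring

-- ===== VERDICT (by name: the statement is the Claim_ definition above) =====
theorem count_duplicates_spec : Claim_equal_count_duplicates := by
  intro d _
  unfold Spec_count_duplicates count_duplicates count_duplicates_alt
  set vs := (PySem.Dict.ofList d).values with hvs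
  have hA : ((PySem.Dict.ofList d).items.foldl
      (fun (p : PySem.Set String × Int) kv =>
        if PySem.Set.contains p.1 kv.2 then (p.1, p.2 + 1) else (PySem.Set.add p.1 kv.2, p.2))
      (PySem.Set.empty, 0))
      = vs.foldl
        (fun (p : PySem.Set String × Int) v =>
          if PySem.Set.contains p.1 v then (p.1, p.2 + 1) else (PySem.Set.add p.1 v, p.2))
        (PySem.Set.empty, 0) := by
    rw [hvs]
    show _ = (((PySem.Dict.ofList d).items).map (·.2)).foldl _ _
    rw [List.foldl_map]
  rw [hA, foldA_eq, foldB_eq]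
  have : PySem.Set.update PySem.Set.empty vs = PySem.Set.ofList vs :=
    PySem.Set.update_nil_left vs
  rw [this]
  simp [PySem.Set.empty]
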